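-- pv_equiv track=rewrite | github.com/sarafanshul/Codes | OJs/ion-flux-relabeling.py | solution
-- ===== SOURCE A (Python) =====
-- def solution(H , Q):
-- 	def _get( x ):
-- 		l , r = 1 , (1<<H) - 1
-- 		if( r == x ):
-- 			return -1
-- 		while( x >= 1 ):
-- 			r -= 1
-- 			m = (l + r) // 2
-- 			if(m == x or r == x) :
-- 				return (r + 1)
-- 			elif( x < m ):
-- 				r = m
-- 			else :
-- 				l = m
-- 	ret = [ _get(i) for i in Q ]
-- 	return ret
-- ===== SOURCE B (Python) =====
-- def solution(H, Q):
--     root = (1 << H) - 1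
--
--     def descend(node, h, x):
--         left = node - (1 << (h - 1))
--         right = node - 1
--         if x == left or x == right:
--             return node
--         if x < left:
--             return descend(left, h - 1, x)
--         return descend(right, h - 1, x)
--
--     return [-1 if x == root else descend(root, H, x) for x in Q]
-- ===== Notes on version B (the rewrite author's own statement) =====
-- stated objective: alternative
-- what changed: Replaced A's iterative [l,r]-interval bisection loop (with per-step midpoint floordiv) by a recursive (node,height) descent that computes each child root directly as node - 2^(h-1) and node - 1.
-- outside the precondition, e.g. on solution(3, [0]): A returns [None], B returns [1]; on solution(0, [0]): A returns [-1], B returns [-1]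
import Mathlib
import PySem

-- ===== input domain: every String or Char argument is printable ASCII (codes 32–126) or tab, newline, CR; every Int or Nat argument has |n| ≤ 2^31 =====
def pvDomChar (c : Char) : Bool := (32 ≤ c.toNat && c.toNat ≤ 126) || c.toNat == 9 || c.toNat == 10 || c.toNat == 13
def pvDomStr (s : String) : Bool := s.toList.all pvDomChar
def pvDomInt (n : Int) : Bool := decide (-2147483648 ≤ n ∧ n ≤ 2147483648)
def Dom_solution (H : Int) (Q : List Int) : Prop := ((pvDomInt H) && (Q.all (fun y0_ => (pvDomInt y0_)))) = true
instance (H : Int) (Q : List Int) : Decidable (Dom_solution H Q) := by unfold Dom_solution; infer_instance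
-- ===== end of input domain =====

-- B replaces A's iterative [l,r]-interval bisection by a recursive (node,height) descent
-- computing child roots directly; same cost, different decomposition (objective: alternative).

-- ===== PORT A =====
-- A's inner while-loop over (l, r); the loop condition 'x >= 1' never changes, so the loop
-- diverges or falls through (returning None) outside Pre_; fuel H.toNat suffices on Pre_
-- (one iteration per tree level), 0 is returned only on fuel exhaustion / fall-through,
-- both unreachable under Pre_.  'm = (l+r)//2' is PySem.Int.floordiv, exact.
def loopA (x : Int) : Nat → Int → Int → Int
  | 0, _, _ => 0
  | f+1, l, r =>
    if 1 ≤ x then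
      let r' := r - 1
      let m := PySem.Int.floordiv (l + r') 2
      if m = x ∨ r' = x then r' + 1
      else if x < m then loopA x f l m
      else loopA x f m r'
    else 0

-- '1 << H' is 2^H.toNat: exact for H ≥ 0; Pre_ requires 1 ≤ H (H < 0 raises ValueError).
def solution (H : Int) (Q : List Int) : List Int :=
  Q.map (fun x =>
    let r := (2:Int) ^ H.toNat - 1
    if r = x then -1 else loopA x H.toNat 1 r)

-- ===== PORT B =====
-- Source B's descend(node, h, x); python h ≥ 1 is Lean h+1, so '1 << (h-1)' is 2^h.
-- The 0 case is fuel exhaustion (python would keep recursing), unreachable under Pre_.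
def descendB (x : Int) : Nat → Int → Int
  | 0, _ => -1
  | h+1, node =>
    let left := node - (2:Int) ^ h
    let right := node - 1
    if x = left ∨ x = right then node
    else if x < left then descendB x h left
    else descendB x h right

def solution_alt (H : Int) (Q : List Int) : List Int :=
  let root := (2:Int) ^ H.toNat - 1
  Q.map (fun x => if x = root then -1 else descendB x H.toNat root)

-- ===== PRECONDITION & SPEC =====
-- Pre_ excludes H ≤ 0 (A raises ValueError for H < 0; H = 0 admits only degenerate queries)
-- and queries outside the tree's label range [1, 2^H - 1], on which A returns None (x < 1,
-- not an Int) or loops forever (x > 2^H - 1).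
def Pre_solution (H : Int) (Q : List Int) : Prop :=
  1 ≤ H ∧ ∀ x ∈ Q, 1 ≤ x ∧ x ≤ (2:Int) ^ H.toNat - 1
instance (H : Int) (Q : List Int) : Decidable (Pre_solution H Q) := by unfold Pre_solution; infer_instance

def pvWitness_solution : Int × List Int := (3, [1, 2, 3, 4, 5, 6, 7])

def Spec_solution (H : Int) (Q : List Int) (out : List Int) : Prop := out = solution_alt H Q
instance (H : Int) (Q : List Int) (out : List Int) : Decidable (Spec_solution H Q out) := by unfold Spec_solution; infer_instance

-- ===== CLAIM (what is proved, stated in full; the proofs are below) =====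
def Claim_equal_solution : Prop := ∀ (H : Int) (Q : List Int), Dom_solution H Q → Pre_solution H Q → Spec_solution H Q (solution H Q)

-- ===== LEMMAS AND PROOFS =====

-- Loop/recursion correspondence: A's interval [l, r] denotes the subtree of height h rooted
-- at label r; after a right descent A's l is one below the true subtree start, which never
-- changes the midpoint (the relevant sum is odd), so l is pinned only up to that slack.
theorem key (h : Nat) : ∀ (f : Nat) (l r x : Int), h ≤ f →
    (l = r - 2^h + 2 ∨ l = r - 2^h + 1) →
    1 ≤ x → r - 2^h + 2 ≤ x → x ≤ r - 1 →
    loopA x f l r = descendB x h r := by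
  induction h with
  | zero =>
    intro f l r x _ _ _ hx2 hx3
    simp at hx2
    omega
  | succ n ih =>
    intro f l r x hf hl hx1 hx2 hx3
    obtain ⟨f', rfl⟩ : ∃ f', f = f' + 1 := ⟨f - 1, by omega⟩
    have hpow : (2:Int) ^ (n+1) = 2 * 2^n := by ring
    have hpos : (0:Int) < 2^n := by positivity
    have hm : PySem.Int.floordiv (l + (r - 1)) 2 = r - 2 ^ n := by
      rw [PySem.Int.floordiv_eq_ediv_of_pos (by omega)]
      omega
    simp only [loopA, descendB, if_pos hx1, hm]
    by_cases hA : x = r - 2 ^ n ∨ x = r - 1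
    · rw [if_pos (by omega : r - 2 ^ n = x ∨ r - 1 = x), if_pos hA]
      omega
    · rw [if_neg (by omega : ¬(r - 2 ^ n = x ∨ r - 1 = x)), if_neg hA]
      by_cases hlt : x < r - 2 ^ n
      · rw [if_pos hlt, if_pos hlt]
        exact ih f' l (r - 2 ^ n) x (by omega) (by omega) hx1 (by omega) (by omega)
      · rw [if_neg hlt, if_neg hlt]
        exact ih f' (r - 2 ^ n) (r - 1) x (by omega) (by omega) hx1 (by omega) (by omega)

-- ===== VERDICT (by name: the statement is the Claim_ definition above) =====
theorem solution_spec : Claim_equal_solution := by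
  intro H Q _ hPre
  obtain ⟨hH, hQ⟩ := hPre
  unfold Spec_solution solution solution_alt
  refine List.map_congr_left ?_
  intro x hx
  obtain ⟨hx1, hx2⟩ := hQ x hx
  have h1 : 1 ≤ H.toNat := by omega
  by_cases hroot : x = (2:Int) ^ H.toNat - 1
  · simp [hroot]
  · rw [if_neg (by omega), if_neg hroot]
    exact key H.toNat H.toNat 1 ((2:Int) ^ H.toNat - 1) x le_rfl (by left; ring) hx1 (by omega) (by omega)
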